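-- pv_equiv track=rewrite | github.com/Syed-Abdul-Ali-Zaidi/Logic-Forge-PSET2 | Challenge_3__The_Mirror_Quest.py | find_longest_mirror_length
-- ===== SOURCE A (Python) =====
-- def find_longest_mirror_length(s : str):
--     if len(s) == 0: # Basecase 1 when there is empty string
--         return 0
--     elif len(s) == 1: # Basecase 2 when there is only one character
--         return 1
--
--     L = 0
--     R = len(s) - 1
--
--     if s[L] == s[R]: # True if first and last character is same
--         s = s[L + 1: R]
--         length = find_longest_mirror_length(s)
--         return length + 2
--
--     # First and last are not same so:
--
--     # Dropping last character and checking again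
--     left_s = s[L: R]
--     left_length = find_longest_mirror_length(left_s)
--
--     # Dropping first character and checking again
--     right_s = s[L+1 : R+1]
--     right_length = find_longest_mirror_length(right_s)
--
--     # Taking largest palindrome
--     if left_length > right_length:
--         return left_length
--     return right_length
-- ===== SOURCE B (Python) =====
-- def find_longest_mirror_length(s: str):
--     # Bottom-up O(n^2) DP over substring endpoints (row per start index),
--     # instead of A's exponential recursion on slices.
--     n = len(s)
--     if n == 0:
--         return 0
--     prev = [0] * n  # dp row for start index i+1
--     for i in range(n - 1, -1, -1):
--         row = [0] * n
--         row[i] = 1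
--         for j in range(i + 1, n):
--             if s[i] == s[j]:
--                 row[j] = prev[j - 1] + 2
--             else:
--                 row[j] = max(prev[j], row[j - 1])
--         prev = row
--     return prev[n - 1]
-- ===== Notes on version B (the rewrite author's own statement) =====
-- stated objective: faster
-- what changed: Replaced A's exponential branching recursion on string slices with a bottom-up dynamic program over substring endpoints (one dp row per start index); intended as faster (O(n^2) vs O(2^n)): measured 7.1x at n=16, and at n=64 A timed out where B returned, so a timing run could not confirm a ratio at the largest size.
import Mathlib
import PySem

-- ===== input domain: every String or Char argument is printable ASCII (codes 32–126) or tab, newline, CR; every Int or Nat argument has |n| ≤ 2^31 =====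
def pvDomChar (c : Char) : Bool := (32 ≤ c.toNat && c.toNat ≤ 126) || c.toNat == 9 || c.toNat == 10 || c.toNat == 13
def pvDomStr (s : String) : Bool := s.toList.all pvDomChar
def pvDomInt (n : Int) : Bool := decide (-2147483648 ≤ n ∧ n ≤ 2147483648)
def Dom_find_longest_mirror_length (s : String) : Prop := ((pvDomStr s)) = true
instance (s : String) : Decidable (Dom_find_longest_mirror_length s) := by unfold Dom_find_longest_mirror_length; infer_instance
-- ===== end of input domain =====

-- B replaces A's branching recursion on string slices by a bottom-up DP over substring
-- endpoints (one dp row per start index); intended as faster (measured 7.1x at n=16;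
-- A timed out at n=64 where B returned); same return value on every input.

-- B replaces A's exponential recursion on string slices with a bottom-up O(n^2) DP
-- over substring endpoints (one dp row per start index); same return value everywhere.

-- ===== PORT A =====
-- literal transliteration of A's recursion (Python slices/indexing via PySem), on the string's character list
def aGo (l : List Char) : Int :=
  if _h0 : l.length = 0 then 0
  else if _h1 : l.length = 1 then 1
  else
    let R : Int := (l.length : Int) - 1
    if PySem.List.pyGet? l 0 = PySem.List.pyGet? l R then
      aGo (PySem.List.slice l (some (0 + 1)) (some R)) + 2
    else
      let left_length := aGo (PySem.List.slice l (some 0) (some R))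
      let right_length := aGo (PySem.List.slice l (some (0 + 1)) (some (R + 1)))
      if left_length > right_length then left_length else right_length
termination_by l.length
decreasing_by
  all_goals
    have hR : ((l.length : Int) - 1) = ((l.length - 1 : Nat) : Int) := by omega
  · rw [hR]
    have h1 : (0:Int) + 1 = ((1:Nat):Int) := by norm_num
    rw [h1, PySem.List.slice_natCast]
    simp; omega
  · rw [hR]
    simp [PySem.List.slice_to_natCast]; omega
  · have hR1 : ((l.length : Int) - 1 + 1) = ((l.length : Nat) : Int) := by omega
    rw [hR1]
    have h1 : (0:Int) + 1 = ((1:Nat):Int) := by norm_num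
    rw [h1, PySem.List.slice_natCast]
    simp; omega

def find_longest_mirror_length (s : String) : Int := aGo s.toList

-- ===== PORT B =====
-- literal transliteration of B (Source B): row-by-row bottom-up DP; Python list indexing /
-- assignment / range loops ported with PySem.List.pyGetD / pySetD / pyRange.
def bInner (l : List Char) (n : Nat) (prev : List Int) (i : Int) : List Int :=
  (PySem.List.pyRange (i + 1) (n : Int) 1).foldl (fun row j =>
    if PySem.List.pyGetD l i ' ' = PySem.List.pyGetD l j ' ' then
      PySem.List.pySetD row j (PySem.List.pyGetD prev (j - 1) 0 + 2)
    else
      PySem.List.pySetD row j (max (PySem.List.pyGetD prev j 0) (PySem.List.pyGetD row (j - 1) 0)))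
    (PySem.List.pySetD (List.replicate n (0 : Int)) i 1)

def find_longest_mirror_length_alt (s : String) : Int :=
  let l := s.toList
  let n := l.length
  if n = 0 then 0
  else
    let prev := (PySem.List.pyRange ((n : Int) - 1) (-1) (-1)).foldl (bInner l n)
      (List.replicate n (0 : Int))
    PySem.List.pyGetD prev ((n : Int) - 1) 0

-- ===== PRECONDITION & SPEC =====
def Spec_find_longest_mirror_length (s : String) (out : Int) : Prop := out = find_longest_mirror_length_alt s
instance (s : String) (out : Int) : Decidable (Spec_find_longest_mirror_length s out) := by unfold Spec_find_longest_mirror_length; infer_instance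

-- ===== CLAIM (what is proved, stated in full; the proofs are below) =====
def Claim_equal_find_longest_mirror_length : Prop := ∀ (s : String), Dom_find_longest_mirror_length s → Spec_find_longest_mirror_length s (find_longest_mirror_length s)

-- ===== LEMMAS AND PROOFS =====
def pvSub (l : List Char) (i j : Nat) : List Char := (l.drop i).take (j + 1 - i)

theorem aGo_single (l : List Char) (h : l.length = 1) : aGo l = 1 := by
  rw [aGo]; simp [h]

theorem pvSub_length (l : List Char) (i j : Nat) (hj : j < l.length) (hij : i ≤ j) :
    (pvSub l i j).length = j + 1 - i := by
  simp [pvSub]; omega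

theorem aGo_step (l : List Char) (i j : Nat) (hij : i < j) (hj : j < l.length) :
    aGo (pvSub l i j) =
      if l.getD i ' ' = l.getD j ' ' then aGo (pvSub l (i + 1) (j - 1)) + 2
      else max (aGo (pvSub l i (j - 1))) (aGo (pvSub l (i + 1) j)) := by
  have hlen : (pvSub l i j).length = j + 1 - i := pvSub_length l i j hj (by omega)
  have h1cast : (0:Int) + 1 = ((1:Nat):Int) := by norm_num
  have hR : ((pvSub l i j).length : Int) - 1 = ((j - i : Nat) : Int) := by rw [hlen]; omega
  have hdrop1 : (pvSub l i j).drop 1 = (l.drop (i+1)).take (j - i) := by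
    rw [pvSub, List.drop_take, List.drop_drop]
    congr 1; omega
  have hget0 : PySem.List.pyGet? (pvSub l i j) 0 = some (l.getD i ' ') := by
    rw [PySem.List.pyGet?_zero, pvSub]
    rw [List.getElem?_take, List.getElem?_drop, if_pos (by omega)]
    rw [List.getElem?_eq_getElem (by omega), List.getD_eq_getElem _ _ (by omega)]
    simp
  have hgetR : PySem.List.pyGet? (pvSub l i j) (((pvSub l i j).length : Int) - 1)
      = some (l.getD j ' ') := by
    rw [hR, PySem.List.pyGet?_natCast, pvSub]
    rw [List.getElem?_take, List.getElem?_drop, if_pos (by omega)]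
    rw [List.getElem?_eq_getElem (by omega), List.getD_eq_getElem _ _ (by omega)]
    simp only [Nat.add_sub_cancel' (le_of_lt hij)]
  have hs1 : PySem.List.slice (pvSub l i j) (some (0+1)) (some (((pvSub l i j).length : Int) - 1))
      = pvSub l (i+1) (j-1) := by
    rw [hR, h1cast, PySem.List.slice_natCast, hdrop1, List.take_take, pvSub]
    congr 1; omega
  have hs2 : PySem.List.slice (pvSub l i j) (some 0) (some (((pvSub l i j).length : Int) - 1))
      = pvSub l i (j-1) := by
    rw [hR]
    simp only [PySem.List.slice_zero_start, PySem.List.slice_to_natCast]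
    rw [pvSub, List.take_take, pvSub]
    congr 1; omega
  have hs3 : PySem.List.slice (pvSub l i j) (some (0+1)) (some (((pvSub l i j).length : Int) - 1 + 1))
      = pvSub l (i+1) j := by
    have : ((pvSub l i j).length : Int) - 1 + 1 = ((j - i + 1 : Nat) : Int) := by
      rw [hlen]; omega
    rw [this, h1cast, PySem.List.slice_natCast, hdrop1, List.take_take, pvSub]
    congr 1; omega
  rw [aGo]
  rw [dif_neg (by omega), dif_neg (by omega)]
  simp only [hget0, hgetR, hs1, hs2, hs3, Option.some.injEq]
  split_ifs with h h2
  · rfl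
  · exact (max_eq_left (by omega)).symm
  · exact (max_eq_right (by omega)).symm

theorem aGo_nil : aGo [] = 0 := by rw [aGo]; simp

theorem pvGetD_set (xs : List Int) (m j : Nat) (v : Int) (hm : m < xs.length) :
    (xs.set m v).getD j 0 = if j = m then v else xs.getD j 0 := by
  simp only [List.getD_eq_getElem?_getD, List.getElem?_set]
  split_ifs with h1 h2
  · subst h1; simp
  · omega
  · omega
  · rfl

theorem pvRow0 (n i j : Nat) (hi : i < n) :
    ((List.replicate n (0:Int)).set i 1).getD j 0 = if j = i then 1 else 0 := by
  rw [pvGetD_set _ _ _ _ (by simpa using hi)]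
  split_ifs with h
  · rfl
  · simp only [List.getD_eq_getElem?_getD, List.getElem?_replicate]
    split_ifs <;> rfl

theorem bInner_partial (l : List Char) (i : Nat) (prev : List Int)
    (hi : i < l.length) (hprev : ∀ j : Nat, j < l.length →
      prev.getD j 0 = if i + 1 ≤ j then aGo (pvSub l (i+1) j) else 0)
    (m : Nat) (hm1 : i + 1 ≤ m) (hm2 : m ≤ l.length) :
    ∀ row, ((PySem.List.pyRange ((i:Int)+1) ((m:Int)) 1).foldl (fun row j =>
      if PySem.List.pyGetD l (i:Int) ' ' = PySem.List.pyGetD l j ' ' then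
        PySem.List.pySetD row j (PySem.List.pyGetD prev (j - 1) 0 + 2)
      else
        PySem.List.pySetD row j (max (PySem.List.pyGetD prev j 0) (PySem.List.pyGetD row (j - 1) 0)))
      ((List.replicate l.length (0:Int)).set i 1) = row) →
    row.length = l.length ∧
    ∀ j : Nat, j < l.length → row.getD j 0 = if i ≤ j ∧ j < m then aGo (pvSub l i j) else 0 := by
  induction m with
  | zero => omega
  | succ m ih =>
    intro row hrow
    by_cases hcase : m < i + 1
    · -- m = i : the range (i+1)..(i+1) is empty, row is the initial row
      have hmi : m = i := by omega
      have hcast : ((m + 1 : Nat) : Int) = (m : Int) + 1 := by push_cast; ring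
      rw [hcast, PySem.List.pyRange_one_eq_nil (by omega)] at hrow
      simp only [List.foldl_nil] at hrow
      subst hrow
      refine ⟨by simp, ?_⟩
      intro j hj
      rw [pvRow0 _ _ _ hi]
      by_cases hji : j = i
      · rw [if_pos hji, if_pos (by omega), hji]
        exact (aGo_single _ (by simp [pvSub_length l i i hi le_rfl])).symm
      · rw [if_neg hji, if_neg (by omega)]
    · -- peel the last index m off the range
      have hmlt : m < l.length := by omega
      have hcast : ((m + 1 : Nat) : Int) = (m : Int) + 1 := by push_cast; ring
      rw [hcast, PySem.List.pyRange_one_succ_right (by omega), List.foldl_append] at hrow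
      obtain ⟨ihlen, ihval⟩ := ih (by omega) (by omega) _ rfl
      set rowm := (PySem.List.pyRange ((i:Int)+1) ((m:Int)) 1).foldl _
        ((List.replicate l.length (0:Int)).set i 1)
      simp only [List.foldl_cons, List.foldl_nil] at hrow
      have hm1' : ((m : Int) - 1) = ((m - 1 : Nat) : Int) := by omega
      rw [PySem.List.pyGetD_natCast, PySem.List.pyGetD_natCast, hm1',
        PySem.List.pyGetD_natCast, PySem.List.pyGetD_natCast, PySem.List.pyGetD_natCast] at hrow
      have hprevm1 : prev.getD (m - 1) 0 = aGo (pvSub l (i+1) (m-1)) := by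
        rw [hprev (m-1) (by omega)]
        split_ifs with h
        · rfl
        · have hmi : m - 1 = i := by omega
          rw [hmi]
          have : pvSub l (i+1) i = [] := by simp [pvSub]
          rw [this, aGo_nil]
      have hprevm : prev.getD m 0 = aGo (pvSub l (i+1) m) := by
        rw [hprev m (by omega), if_pos (by omega)]
      have hrowm1 : rowm.getD (m-1) 0 = aGo (pvSub l i (m-1)) := by
        rw [ihval (m-1) (by omega), if_pos (by omega)]
      have hstep := aGo_step l i m (by omega) hmlt
      -- now compute the new row
      rw [hprevm1, hprevm, hrowm1] at hrow
      have hlenrow : row.length = l.length := by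
        rw [← hrow]
        split_ifs
        · rw [PySem.List.pySetD_natCast, List.length_set]; exact ihlen
        · rw [PySem.List.pySetD_natCast, List.length_set]; exact ihlen
      refine ⟨hlenrow, ?_⟩
      intro j hj
      rw [← hrow]
      by_cases hjm : j = m
      · rw [hjm]
        split_ifs with hc h2 h3
        · rw [PySem.List.pySetD_natCast, pvGetD_set _ _ _ _ (by omega), if_pos rfl]
          exact (hstep.trans (if_pos hc)).symm
        · omega
        · rw [PySem.List.pySetD_natCast, pvGetD_set _ _ _ _ (by omega), if_pos rfl, max_comm]
          exact (hstep.trans (if_neg hc)).symm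
        · omega
      · have hkeep : ∀ v : Int, (rowm.set m v).getD j 0 = rowm.getD j 0 := by
          intro v
          rw [pvGetD_set _ _ _ _ (by omega), if_neg hjm]
        split_ifs with hc <;>
          rw [PySem.List.pySetD_natCast, hkeep, ihval j hj] <;>
          · split_ifs <;> first | rfl | omega

theorem bOuter_inv (l : List Char) (t : Nat) (prev : List Int)
    (ht : t ≤ l.length)
    (hlen : prev.length = l.length)
    (hprev : ∀ j : Nat, j < l.length → prev.getD j 0 = if t ≤ j then aGo (pvSub l t j) else 0) :
    ((PySem.List.pyRange ((t:Int) - 1) (-1) (-1)).foldl (bInner l l.length) prev).length = l.length ∧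
    ∀ j : Nat, j < l.length →
      ((PySem.List.pyRange ((t:Int) - 1) (-1) (-1)).foldl (bInner l l.length) prev).getD j 0
        = aGo (pvSub l 0 j) := by
  induction t generalizing prev with
  | zero =>
    rw [show ((0:Nat):Int) - 1 = -1 by norm_num, PySem.List.pyRange_neg_one_eq_nil le_rfl,
      List.foldl_nil]
    refine ⟨hlen, ?_⟩
    intro j hj
    rw [hprev j hj, if_pos (by omega)]
  | succ t ih =>
    have hstep : (PySem.List.pyRange (((t+1:Nat):Int) - 1) (-1) (-1))
        = (t : Int) :: PySem.List.pyRange ((t:Int) - 1) (-1) (-1) := by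
      rw [show (((t+1:Nat):Int) - 1) = ((t:Nat):Int) by push_cast; ring]
      exact PySem.List.pyRange_neg_one_cons (by omega)
    rw [hstep, List.foldl_cons]
    have hrow : bInner l l.length prev (t : Int)
        = (PySem.List.pyRange ((t:Int) + 1) ((l.length : Nat) : Int) 1).foldl (fun row j =>
            if PySem.List.pyGetD l (t:Int) ' ' = PySem.List.pyGetD l j ' ' then
              PySem.List.pySetD row j (PySem.List.pyGetD prev (j - 1) 0 + 2)
            else
              PySem.List.pySetD row j (max (PySem.List.pyGetD prev j 0) (PySem.List.pyGetD row (j - 1) 0)))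
          ((List.replicate l.length (0:Int)).set t 1) := by
      rw [bInner, PySem.List.pySetD_natCast]
    obtain ⟨hlen2, hval2⟩ := bInner_partial l t prev (by omega)
      (by intro j hj; exact hprev j hj) l.length (by omega) le_rfl _ rfl
    refine ih (bInner l l.length prev (t:Int)) (by omega) ?_ ?_
    · rw [hrow]; exact hlen2
    · intro j hj
      rw [hrow]
      rw [hval2 j hj]
      split_ifs with h1 h2 h2 <;> first | rfl | omega

theorem pvFinal (s : String) : aGo s.toList = find_longest_mirror_length_alt s := by
  rw [find_longest_mirror_length_alt]
  by_cases hn : s.toList.length = 0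
  · rw [if_pos hn]
    rw [List.length_eq_zero_iff] at hn
    rw [hn, aGo_nil]
  · rw [if_neg hn]
    obtain ⟨hlen, hval⟩ := bOuter_inv s.toList s.toList.length (List.replicate s.toList.length 0)
      le_rfl (by simp) (by
        intro j hj
        rw [if_neg (by omega)]
        simp [List.getD_eq_getElem?_getD, List.getElem?_replicate]
        split_ifs <;> rfl)
    have hc : ((s.toList.length : Int) - 1) = ((s.toList.length - 1 : Nat) : Int) := by omega
    rw [hc] at hval ⊢
    rw [PySem.List.pyGetD_natCast, hval (s.toList.length - 1) (by omega)]
    have : pvSub s.toList 0 (s.toList.length - 1) = s.toList := by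
      rw [pvSub, List.drop_zero, show s.toList.length - 1 + 1 - 0 = s.toList.length by omega,
        List.take_length]
    rw [this]

-- ===== VERDICT (by name: the statement is the Claim_ definition above) =====
theorem find_longest_mirror_length_spec : Claim_equal_find_longest_mirror_length := by
  intro s _
  unfold Spec_find_longest_mirror_length
  exact pvFinal s
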